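-- pv_equiv track=rewrite | github.com/amin-khorram/PrologUnificationAlgorithm | UnificationAlgorithm.py | func_ele
-- ===== SOURCE A (Python) =====
-- def func_ele (tempele):
--     #start the list of arguments empty
--     argu = []
--     #start the argument status empty
--     argstat = ""
--     #start the number of commas and paranthesis equal to zero
--     pr=0
--     com=0
--     #define a temporary argument value finder empty
--     tempargstat =""
--     #define a variable to detect the firs observed paranthesis "("
--     fpar =0
--     #loop to fill the argstat when it sees the first paranthesis "("
--     for i in tempele:
--         if fpar ==1:
--             argstat =argstat +i
--         if i=="(":
--             fpar =1
--     #now remove the last element from argstat which is ")"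
--     argstat = argstat[:-1]
--     #loop to find the number of commas and fill the list of arguments with temporary argument values
--     for j in argstat:
--         if j=="," and pr==0:
--             com=com+1
--             argu.append(tempargstat)
--             tempargstat =""
--         else:
--             tempargstat = tempargstat + j
--         #if see "(" increase the number of paranthesis
--         if j =="(":
--             pr=pr+1
--         #if see ")" decrease the number of paranthesis
--         elif j == ")":
--             pr=pr-1
--     #if the number of commas is o the only found argument will be appended to the list of arguments
--     if com==0:
--         argu.append(argstat)
--     else:
--         # otherwise the last argument is added to the argument list
--         argu.append(tempargstat)
--     return (argu)
-- ===== SOURCE B (Python) =====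
-- def func_ele(tempele):
--     i = tempele.find('(')
--     inner = tempele[i+1:][:-1] if i != -1 else ""
--     tokens = inner.split(',')
--     args = []
--     buf = []
--     bal = 0
--     for t in tokens[:-1]:
--         buf.append(t)
--         bal += t.count('(') - t.count(')')
--         if bal == 0:
--             args.append(','.join(buf))
--             buf = []
--     buf.append(tokens[-1])
--     args.append(','.join(buf))
--     return args
-- ===== Notes on version B (the rewrite author's own statement) =====
-- stated objective: faster
-- what changed: B replaces A's two stateful character-by-character scans (a first-parenthesis flag loop, then a char loop that re-splits on commas while tracking depth and a comma counter) with find+slicing to obtain the inner string, one comma split producing all raw tokens, and a token-level pass that re-merges tokens by cumulative parenthesis balance.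
import Mathlib
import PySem

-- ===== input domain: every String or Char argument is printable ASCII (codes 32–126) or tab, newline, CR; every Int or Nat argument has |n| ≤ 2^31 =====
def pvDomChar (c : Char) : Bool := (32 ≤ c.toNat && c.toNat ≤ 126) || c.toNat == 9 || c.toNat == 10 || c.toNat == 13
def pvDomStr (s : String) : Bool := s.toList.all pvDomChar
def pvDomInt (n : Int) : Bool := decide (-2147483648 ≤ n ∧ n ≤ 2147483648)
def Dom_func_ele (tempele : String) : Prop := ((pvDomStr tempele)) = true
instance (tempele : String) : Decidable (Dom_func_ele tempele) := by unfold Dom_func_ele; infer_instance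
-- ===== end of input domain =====

-- B computes the same argument list via find+slice, one comma split, and a token-level re-merge by cumulative parenthesis balance, instead of A's two stateful per-character scans (measured constant-factor faster).


-- ===== PORT A =====
def func_ele (tempele : String) : List String :=
  let st1 := tempele.toList.foldl
    (fun (s : List Char × Nat) i =>
      let argstat := if s.2 = 1 then s.1 ++ [i] else s.1
      let fpar := if i = '(' then 1 else s.2
      (argstat, fpar)) ([], 0)
  let argstat := PySem.List.slice st1.1 none (some (-1))
  let st2 := argstat.foldl
    (fun (s : List String × List Char × Int × Int) j =>
      let p1 :=
        if j = ',' ∧ s.2.2.1 = 0 then (s.1 ++ [String.ofList s.2.1], ([] : List Char), s.2.2.2 + 1)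
        else (s.1, s.2.1 ++ [j], s.2.2.2)
      let pr := if j = '(' then s.2.2.1 + 1 else if j = ')' then s.2.2.1 - 1 else s.2.2.1
      (p1.1, p1.2.1, pr, p1.2.2)) ([], [], 0, 0)
  if st2.2.2.2 = 0 then st2.1 ++ [String.ofList argstat] else st2.1 ++ [String.ofList st2.2.1]

-- ===== PORT B =====
def func_ele_alt (tempele : String) : List String :=
  let i := PySem.Str.find tempele "("
  let inner : List Char :=
    if i ≠ -1 then PySem.List.slice (PySem.List.slice tempele.toList (some (i + 1)) none) none (some (-1))
    else []
  let tokens := PySem.Chars.splitOn inner [',']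
  let s := (PySem.List.slice tokens none (some (-1))).foldl
    (fun (s : List String × List (List Char) × Int) t =>
      let buf := s.2.1 ++ [t]
      let bal := s.2.2 + (PySem.Chars.count t ['('] : Int) - (PySem.Chars.count t [')'] : Int)
      if bal = 0 then (s.1 ++ [String.ofList (PySem.Chars.join [','] buf)], ([] : List (List Char)), bal)
      else (s.1, buf, bal)) ([], [], 0)
  let buf := s.2.1 ++ [(PySem.List.pyGet? tokens (-1)).getD []]
  s.1 ++ [String.ofList (PySem.Chars.join [','] buf)]

-- ===== PRECONDITION & SPEC =====
def Spec_func_ele (tempele : String) (out : List String) : Prop := out = func_ele_alt tempele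
instance (tempele : String) (out : List String) : Decidable (Spec_func_ele tempele out) := by unfold Spec_func_ele; infer_instance

-- ===== CLAIM (what is proved, stated in full; the proofs are below) =====
def Claim_equal_func_ele : Prop := ∀ (tempele : String), Dom_func_ele tempele → Spec_func_ele tempele (func_ele tempele)

-- ===== LEMMAS AND PROOFS =====

-- proof-side helpers
def pvStep1 (s : List Char × Nat) (i : Char) : List Char × Nat :=
  let argstat := if s.2 = 1 then s.1 ++ [i] else s.1
  let fpar := if i = '(' then 1 else s.2
  (argstat, fpar)

def pvAStep (s : List String × List Char × Int × Int) (j : Char) : List String × List Char × Int × Int :=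
  let p1 :=
    if j = ',' ∧ s.2.2.1 = 0 then (s.1 ++ [String.ofList s.2.1], ([] : List Char), s.2.2.2 + 1)
    else (s.1, s.2.1 ++ [j], s.2.2.2)
  let pr := if j = '(' then s.2.2.1 + 1 else if j = ')' then s.2.2.1 - 1 else s.2.2.1
  (p1.1, p1.2.1, pr, p1.2.2)

def pvBStep (s : List String × List (List Char) × Int) (t : List Char) : List String × List (List Char) × Int :=
  let buf := s.2.1 ++ [t]
  let bal := s.2.2 + (PySem.Chars.count t ['('] : Int) - (PySem.Chars.count t [')'] : Int)
  if bal = 0 then (s.1 ++ [String.ofList (PySem.Chars.join [','] buf)], ([] : List (List Char)), bal)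
  else (s.1, buf, bal)

def pvBFinish (tokens : List (List Char)) (st : List String × List (List Char) × Int) : List String :=
  let s := tokens.dropLast.foldl pvBStep st
  s.1 ++ [String.ofList (PySem.Chars.join [','] (s.2.1 ++ [tokens.getLast?.getD []]))]

def afterParen : List Char → List Char
  | [] => []
  | c :: cs => if c = '(' then cs else afterParen cs

def consHead (p : List Char) : List (List Char) → List (List Char)
  | [] => [p]
  | t :: ts => (p ++ t) :: ts

def mySplit : List Char → List (List Char)
  | [] => [[]]
  | c :: cs => if c = ',' then [] :: mySplit cs else consHead [c] (mySplit cs)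

def pvDelta (cs : List Char) : Int := (cs.count '(' : Int) - (cs.count ')' : Int)

lemma loop1_on (cs : List Char) (acc : List Char) :
    cs.foldl pvStep1 (acc, 1) = (acc ++ cs, 1) := by
  induction cs generalizing acc with
  | nil => simp
  | cons c cs ih => simp [pvStep1, ih]


lemma loop1_off (cs : List Char) (acc : List Char) :
    (cs.foldl pvStep1 (acc, 0)).1 = acc ++ afterParen cs := by
  induction cs generalizing acc with
  | nil => simp [afterParen]
  | cons c cs ih =>
    by_cases hc : c = '('
    · simp [pvStep1, hc, afterParen, loop1_on]
    · simp [pvStep1, hc, afterParen, ih]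


lemma com_mono (cs : List Char) (st : List String × List Char × Int × Int) :
    st.2.2.2 ≤ (cs.foldl pvAStep st).2.2.2 := by
  induction cs generalizing st with
  | nil => simp
  | cons c cs ih =>
    refine le_trans ?_ (ih (pvAStep st c))
    simp only [pvAStep]
    split <;> simp


lemma com_eq (cs : List Char) (st : List String × List Char × Int × Int)
    (h : (cs.foldl pvAStep st).2.2.2 = st.2.2.2) :
    (cs.foldl pvAStep st).1 = st.1 ∧ (cs.foldl pvAStep st).2.1 = st.2.1 ++ cs := by
  induction cs generalizing st with
  | nil => simp
  | cons c cs ih =>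
    simp only [List.foldl_cons] at h ⊢
    by_cases hc : c = ',' ∧ st.2.2.1 = 0
    · exfalso
      have h1 : (pvAStep st c).2.2.2 = st.2.2.2 + 1 := by simp [pvAStep, hc]
      have := com_mono cs (pvAStep st c)
      omega
    · have h1 : pvAStep st c = (st.1, st.2.1 ++ [c],
        (if c = '(' then st.2.2.1 + 1 else if c = ')' then st.2.2.1 - 1 else st.2.2.1), st.2.2.2) := by
        simp [pvAStep, hc]
      rw [h1] at h ⊢
      obtain ⟨ha, ht⟩ := ih _ h
      simp at ha ht
      simp [ha, ht]


lemma join_cons_ne (x : List Char) (l : List (List Char)) (h : l ≠ []) :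
    PySem.Chars.join [','] (x :: l) = x ++ [','] ++ PySem.Chars.join [','] l := by
  obtain ⟨y, ys, rfl⟩ := List.exists_cons_of_ne_nil h
  exact PySem.Chars.join_cons_cons _ _ _ _


lemma join_snoc (xs : List (List Char)) (a : List Char) :
    PySem.Chars.join [','] (xs ++ [a]) = PySem.Chars.join [','] (xs ++ [[]]) ++ a := by
  induction xs with
  | nil => simp [PySem.Chars.join_singleton]
  | cons x xs ih =>
    rw [List.cons_append, List.cons_append,
      join_cons_ne x (xs ++ [a]) (by simp), join_cons_ne x (xs ++ [[]]) (by simp), ih]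
    simp


lemma join_snoc_nil (xs : List (List Char)) (hx : xs ≠ []) :
    PySem.Chars.join [','] (xs ++ [[]]) = PySem.Chars.join [','] xs ++ [','] := by
  induction xs with
  | nil => exact absurd rfl hx
  | cons x xs ih =>
    cases xs with
    | nil =>
      simp [PySem.Chars.join_cons_cons, PySem.Chars.join_singleton]
    | cons y ys =>
      rw [List.cons_append, join_cons_ne x ((y :: ys) ++ [[]]) (by simp),
        ih (by simp), join_cons_ne x (y :: ys) (by simp)]
      simp


lemma consHead_cons (p t : List Char) (ts : List (List Char)) :
    consHead p (t :: ts) = (p ++ t) :: ts := rfl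

lemma mySplit_ne_nil (cs : List Char) : mySplit cs ≠ [] := by
  cases cs with
  | nil => simp [mySplit]
  | cons c cs =>
    simp only [mySplit]
    split
    · simp
    · cases h : mySplit cs <;> simp [consHead]


lemma consHead_nil (ts : List (List Char)) (h : ts ≠ []) : consHead [] ts = ts := by
  cases ts with
  | nil => exact absurd rfl h
  | cons t ts => simp [consHead]


lemma consHead_consHead (p q : List Char) (ts : List (List Char)) :
    consHead p (consHead q ts) = consHead (p ++ q) ts := by
  cases ts <;> simp [consHead]


lemma splitOn_go_comma : ∀ (fuel : Nat) (l cur : List Char) (acc : List (List Char)),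
    l.length ≤ fuel →
    PySem.Chars.splitOn.go [','] fuel l cur acc = acc.reverse ++ consHead cur.reverse (mySplit l) := by
  intro fuel
  induction fuel with
  | zero =>
    intro l cur acc h
    have : l = [] := by cases l <;> simp_all
    subst this
    simp [PySem.Chars.splitOn.go, mySplit, consHead]
  | succ f ih =>
    intro l cur acc h
    cases l with
    | nil => simp [PySem.Chars.splitOn.go, mySplit, consHead]
    | cons c rest =>
      by_cases hc : c = ','
      · have hp : [','].isPrefixOf (c :: rest) = true := by simp [hc, List.isPrefixOf]
        rw [PySem.Chars.splitOn.go, if_pos hp]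
        simp only [List.length_cons] at h
        simp only [List.length_cons, List.length_nil, List.drop_succ_cons, List.drop_zero]
        rw [ih rest _ _ (by omega)]
        simp only [List.reverse_nil]
        rw [consHead_nil _ (mySplit_ne_nil rest)]
        simp [mySplit, hc, consHead_cons]
      · have hp : [','].isPrefixOf (c :: rest) = false := by
          simp [List.isPrefixOf]
          exact fun h' => absurd h'.symm hc
        rw [PySem.Chars.splitOn.go, if_neg (by simp [hp])]
        simp only [List.length_cons] at h
        rw [ih rest _ _ (by omega)]
        simp [mySplit, hc, consHead_consHead]


lemma splitOn_comma (s : List Char) : PySem.Chars.splitOn s [','] = mySplit s := by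
  have := splitOn_go_comma (s.length + 1) s [] [] (by omega)
  simpa [PySem.Chars.splitOn, consHead_nil _ (mySplit_ne_nil s)] using this


lemma count_go_single : ∀ (fuel : Nat) (l : List Char) (acc : Nat) (x : Char),
    l.length ≤ fuel → PySem.Chars.count.go [x] fuel l acc = acc + l.count x := by
  intro fuel
  induction fuel with
  | zero =>
    intro l acc x h
    have : l = [] := by cases l <;> simp_all
    subst this
    simp [PySem.Chars.count.go]
  | succ f ih =>
    intro l acc x h
    cases l with
    | nil => simp [PySem.Chars.count.go]
    | cons c t =>
      simp only [List.length_cons] at h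
      by_cases hc : c = x
      · have hp : [x].isPrefixOf (c :: t) = true := by simp [hc, List.isPrefixOf]
        rw [PySem.Chars.count.go, if_pos hp]
        rw [ih _ _ x (by simpa using Nat.le_of_succ_le_succ h)]
        simp [hc]
        omega
      · have hp : [x].isPrefixOf (c :: t) = false := by
          simp [List.isPrefixOf]
          exact fun h' => absurd h'.symm hc
        rw [PySem.Chars.count.go, if_neg (by simp [hp])]
        rw [ih _ _ x (by omega)]
        simp [List.count_cons]
        omega


lemma count_single (l : List Char) (x : Char) : PySem.Chars.count l [x] = l.count x := by
  rw [PySem.Chars.count, if_neg (by simp)]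
  simpa using count_go_single l.length l 0 x le_rfl


lemma pvDelta_nil : pvDelta [] = 0 := by simp [pvDelta]

lemma pvDelta_snoc (p : List Char) (c : Char) :
    pvDelta (p ++ [c]) = pvDelta p + (if c = '(' then 1 else if c = ')' then -1 else 0) := by
  simp only [pvDelta, List.count_append]
  split_ifs with h1 h2 <;> simp_all <;> ring

lemma join_snoc_snoc (xs : List (List Char)) (a b : List Char) :
    PySem.Chars.join [','] (xs ++ [a]) ++ b = PySem.Chars.join [','] (xs ++ [a ++ b]) := by
  rw [join_snoc xs a, join_snoc xs (a ++ b), List.append_assoc]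

lemma pvBStep_eq (a : List String) (b : List (List Char)) (l : Int) (t : List Char) :
    pvBStep (a, b, l) t =
      if l + pvDelta t = 0 then
        (a ++ [String.ofList (PySem.Chars.join [','] (b ++ [t]))], ([] : List (List Char)), l + pvDelta t)
      else (a, b ++ [t], l + pvDelta t) := by
  simp [pvBStep, count_single, pvDelta, add_sub_assoc]

lemma pvBFinish_cons2 (t u : List Char) (ts : List (List Char)) (st : List String × List (List Char) × Int) :
    pvBFinish (t :: u :: ts) st = pvBFinish (u :: ts) (pvBStep st t) := by
  simp [pvBFinish]

lemma pv_main : ∀ (cs : List Char) (args : List String) (buf : List (List Char)) (p : List Char)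
    (bal com : Int),
    (cs.foldl pvAStep (args, PySem.Chars.join [','] (buf ++ [p]), bal + pvDelta p, com)).1
      ++ [String.ofList (cs.foldl pvAStep (args, PySem.Chars.join [','] (buf ++ [p]), bal + pvDelta p, com)).2.1]
    = pvBFinish (consHead p (mySplit cs)) (args, buf, bal) := by
  intro cs
  induction cs with
  | nil =>
    intro args buf p bal com
    simp [mySplit, consHead_cons, pvBFinish]
  | cons c cs ih =>
    intro args buf p bal com
    obtain ⟨t0, ts, hsp⟩ := List.exists_cons_of_ne_nil (mySplit_ne_nil cs)
    by_cases hc : c = ','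
    · subst hc
      have hsplit : mySplit (',' :: cs) = [] :: mySplit cs := by simp [mySplit]
      have hRHS : pvBFinish (consHead p (mySplit (',' :: cs))) (args, buf, bal)
          = pvBFinish (mySplit cs) (pvBStep (args, buf, bal) p) := by
        rw [hsplit, consHead_cons, List.append_nil, hsp, pvBFinish_cons2, ← hsp]
      by_cases hz : bal + pvDelta p = 0
      · have hstep : pvAStep (args, PySem.Chars.join [','] (buf ++ [p]), bal + pvDelta p, com) ','
            = (args ++ [String.ofList (PySem.Chars.join [','] (buf ++ [p]))], ([] : List Char),
               bal + pvDelta p, com + 1) := by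
          simp [pvAStep, hz]
        have H := ih (args ++ [String.ofList (PySem.Chars.join [','] (buf ++ [p]))]) [] [] 0 (com + 1)
        simp only [pvDelta_nil, add_zero, List.nil_append, PySem.Chars.join_singleton] at H
        rw [List.foldl_cons, hstep, hz, H, hRHS, pvBStep_eq, if_pos hz, hz,
          consHead_nil _ (mySplit_ne_nil cs)]
      · have hstep : pvAStep (args, PySem.Chars.join [','] (buf ++ [p]), bal + pvDelta p, com) ','
            = (args, PySem.Chars.join [','] (buf ++ [p]) ++ [','], bal + pvDelta p, com) := by
          simp [pvAStep, hz]
        have H := ih args (buf ++ [p]) [] (bal + pvDelta p) com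
        simp only [pvDelta_nil, add_zero] at H
        rw [join_snoc_nil (buf ++ [p]) (by simp)] at H
        rw [List.foldl_cons, hstep, H, hRHS, pvBStep_eq, if_neg hz,
          consHead_nil _ (mySplit_ne_nil cs)]
    · have hsplit : mySplit (c :: cs) = consHead [c] (mySplit cs) := by simp [mySplit, hc]
      have hstep : pvAStep (args, PySem.Chars.join [','] (buf ++ [p]), bal + pvDelta p, com) c
          = (args, PySem.Chars.join [','] (buf ++ [p]) ++ [c],
             bal + pvDelta (p ++ [c]), com) := by
        simp only [pvAStep, if_neg (show ¬(c = ',' ∧ bal + pvDelta p = 0) by simp [hc])]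
        rw [pvDelta_snoc]
        split_ifs with h1 h2 <;> simp <;> ring
      have H := ih args buf (p ++ [c]) bal com
      rw [← join_snoc_snoc buf p [c]] at H
      rw [List.foldl_cons, hstep, H, hsplit, consHead_consHead]

lemma afterParen_nil_of_not_mem (s : List Char) (h : '(' ∉ s) : afterParen s = [] := by
  induction s with
  | nil => rfl
  | cons c cs ih =>
    have h1 : c ≠ '(' := fun hh => h (hh ▸ List.mem_cons_self)
    have h2 : '(' ∉ cs := fun hh => h (List.mem_cons_of_mem _ hh)
    simp [afterParen, h1, ih h2]


lemma afterParen_append (u v : List Char) (h : '(' ∉ u) :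
    afterParen (u ++ '(' :: v) = v := by
  induction u with
  | nil => simp [afterParen]
  | cons c u ih =>
    have h1 : c ≠ '(' := fun hh => h (hh ▸ List.mem_cons_self)
    have h2 : '(' ∉ u := fun hh => h (List.mem_cons_of_mem _ hh)
    simp [afterParen, h1, ih h2]


lemma funcA_eq (s : String) :
    func_ele s = pvBFinish (mySplit ((afterParen s.toList).dropLast)) ([], [], 0) := by
  have h1 : (s.toList.foldl pvStep1 ([], 0)).1 = afterParen s.toList := by
    simpa using loop1_off s.toList []
  have hmain := pv_main ((afterParen s.toList).dropLast) [] [] [] 0 0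
  simp only [pvDelta_nil, add_zero, List.nil_append, PySem.Chars.join_singleton,
    consHead_nil _ (mySplit_ne_nil _)] at hmain
  show (let st1 := s.toList.foldl pvStep1 ([], 0)
        let argstat := PySem.List.slice st1.1 none (some (-1))
        let st2 := argstat.foldl pvAStep ([], [], 0, 0)
        if st2.2.2.2 = 0 then st2.1 ++ [String.ofList argstat] else st2.1 ++ [String.ofList st2.2.1]) = _
  simp only [h1, PySem.List.slice_to_neg_one]
  by_cases hcom : (((afterParen s.toList).dropLast).foldl pvAStep ([], [], 0, 0)).2.2.2 = 0
  · obtain ⟨ha, ht⟩ := com_eq ((afterParen s.toList).dropLast) ([], [], 0, 0) (by simpa using hcom)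
    simp only [List.nil_append] at ht
    have hofl : String.ofList ((afterParen s.toList).dropLast)
        = String.ofList ((((afterParen s.toList).dropLast).foldl pvAStep ([], [], 0, 0)).2.1) := by
      rw [ht]
    rw [if_pos hcom, hofl]
    exact hmain
  · rw [if_neg hcom]
    exact hmain

lemma funcB_eq (s : String) :
    func_ele_alt s = pvBFinish (mySplit ((afterParen s.toList).dropLast)) ([], [], 0) := by
  have hfs : PySem.Str.find s "(" = PySem.Chars.find s.toList ['('] := by
    simp [PySem.Str.find_eq]
  have hinner : (if PySem.Str.find s "(" ≠ -1 then
      PySem.List.slice (PySem.List.slice s.toList (some (PySem.Str.find s "(" + 1)) none) none (some (-1))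
      else []) = (afterParen s.toList).dropLast := by
    by_cases hf : PySem.Chars.find s.toList ['('] = -1
    · have hmem : '(' ∉ s.toList := by
        intro hm
        obtain ⟨u, v, huv⟩ := List.append_of_mem hm
        rw [PySem.Chars.find_eq_neg_one_iff] at hf
        exact hf ⟨u, v, by rw [huv]; simp⟩
      rw [if_neg (by simp [hf]), afterParen_nil_of_not_mem _ hmem]
      rfl
    · have h0 : 0 ≤ PySem.Chars.find s.toList ['('] := by
        have := PySem.Chars.neg_one_le_find s.toList ['(']
        omega
      obtain ⟨hpre, hmin⟩ := PySem.Chars.find_spec h0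
      set n := (PySem.Chars.find s.toList ['(']).toNat with hn
      obtain ⟨t, ht⟩ := hpre
      have hdrop : s.toList.drop (n + 1) = t := by
        calc s.toList.drop (n + 1) = (s.toList.drop n).tail := List.tail_drop.symm
        _ = (['('] ++ t).tail := by rw [ht]
        _ = t := rfl
      have hdecomp : s.toList = s.toList.take n ++ '(' :: t := by
        conv_lhs => rw [← List.take_append_drop n s.toList, ← ht]
        simp
      have hnotmem : '(' ∉ s.toList.take n := by
        intro hm
        obtain ⟨i, hi, hgi⟩ := List.mem_iff_getElem.mp hm
        have hi' : i < n := lt_of_lt_of_le hi (by rw [List.length_take]; exact min_le_left _ _)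
        have hil : i < s.toList.length := lt_of_lt_of_le hi (by rw [List.length_take]; exact min_le_right _ _)
        refine hmin i hi' ⟨s.toList.drop (i + 1), ?_⟩
        rw [List.drop_eq_getElem_cons hil]
        have : s.toList[i] = '(' := by rw [← List.getElem_take]; exact hgi
        simp [this]
      have hafter : afterParen s.toList = t := by
        conv_lhs => rw [hdecomp]
        exact afterParen_append _ _ hnotmem
      rw [if_pos (by simp; omega), hfs,
        PySem.List.slice_from s.toList (show (0:Int) ≤ PySem.Chars.find s.toList ['('] + 1 by omega)]
      have hton : (PySem.Chars.find s.toList ['('] + 1).toNat = n + 1 := by omega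
      rw [hton, hdrop, PySem.List.slice_to_neg_one, hafter]
  show (let i := PySem.Str.find s "("
        let inner := if i ≠ -1 then
          PySem.List.slice (PySem.List.slice s.toList (some (i + 1)) none) none (some (-1)) else []
        let tokens := PySem.Chars.splitOn inner [',']
        let st := (PySem.List.slice tokens none (some (-1))).foldl pvBStep ([], [], 0)
        let buf := st.2.1 ++ [(PySem.List.pyGet? tokens (-1)).getD []]
        st.1 ++ [String.ofList (PySem.Chars.join [','] buf)]) = _
  simp only [hinner]
  simp only [splitOn_comma, PySem.List.slice_to_neg_one, PySem.List.pyGet?_neg_one]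
  simp [pvBFinish]

-- ===== VERDICT (by name: the statement is the Claim_ definition above) =====
theorem func_ele_spec : Claim_equal_func_ele := by
  intro s _
  unfold Spec_func_ele
  rw [funcA_eq, funcB_eq]
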